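-- pv_equiv track=rewrite | github.com/norice2000/python_leet | pluralsight/Python Data Structures/01_Using Lists/list_problems/prob2_attempt_1.py | find_missing_security_groups
-- ===== SOURCE A (Python) =====
-- def find_missing_security_groups(required_ports, existing_rules):
--     """
--     CHALLENGE 2: Find Missing Security Group Rules
--
--     You need to ensure specific ports (1-1000) are covered by security group rules.
--     Given existing rules, find which ports are missing coverage.
--
--     Args:
--         required_ports (list): List of port numbers that must be accessible
--         existing_rules (list): List of port ranges as tuples [(start, end), ...]
--
--     Returns:
--         list: Port numbers that are not covered by existing rules
--
--     Example:
--         required_ports = [22, 80, 443, 8080, 9000]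
--         existing_rules = [(20, 25), (443, 443), (8000, 9000)]
--         Result: [80] (port 80 is not covered)
--
--     Real-world: Ensures all required services have proper firewall access
--     """
--     # initliaze not_convered list
--     not_covered = []
--     # iterate required ports
--     for port in required_ports:
--         is_convered = False
--     # iterate tuple start, end for existing_rules
--         for start_port, end_port in existing_rules:
--     # check start < req_port < end
--             if start_port < port < end_port:
--     # is_convered = True
--                 is_convered = True
--     # break
--                 break
--     # if is_covered = False
--         if not is_convered:
--             not_covered.append(port)
--     return not_covered
-- ===== SOURCE B (Python) =====
-- def find_missing_security_groups(required_ports, existing_rules):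
--     # A port p is covered iff start < p < end for some rule, i.e. p lies in the
--     # integer span [start+1, end-1].  Merge those spans once, then test each port
--     # against the (usually much shorter) merged list.
--     spans = sorted(((s + 1, e - 1) for s, e in existing_rules if s + 1 <= e - 1),
--                    key=lambda t: t[0])
--     merged = []
--     cur = None
--     for s, e in spans:
--         if cur is None:
--             cur = (s, e)
--         elif s <= cur[1] + 1:
--             if e > cur[1]:
--                 cur = (cur[0], e)
--         else:
--             merged.append(cur)
--             cur = (s, e)
--     if cur is not None:
--         merged.append(cur)
--     return [p for p in required_ports
--             if not any(s <= p <= e for s, e in merged)]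
-- ===== Notes on version B (the rewrite author's own statement) =====
-- stated objective: faster
-- what changed: Instead of scanning every rule for every port, B normalises each rule to its strict-interior integer span, sorts and merges the spans once, and tests each port only against the short merged disjoint list.
import Mathlib
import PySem

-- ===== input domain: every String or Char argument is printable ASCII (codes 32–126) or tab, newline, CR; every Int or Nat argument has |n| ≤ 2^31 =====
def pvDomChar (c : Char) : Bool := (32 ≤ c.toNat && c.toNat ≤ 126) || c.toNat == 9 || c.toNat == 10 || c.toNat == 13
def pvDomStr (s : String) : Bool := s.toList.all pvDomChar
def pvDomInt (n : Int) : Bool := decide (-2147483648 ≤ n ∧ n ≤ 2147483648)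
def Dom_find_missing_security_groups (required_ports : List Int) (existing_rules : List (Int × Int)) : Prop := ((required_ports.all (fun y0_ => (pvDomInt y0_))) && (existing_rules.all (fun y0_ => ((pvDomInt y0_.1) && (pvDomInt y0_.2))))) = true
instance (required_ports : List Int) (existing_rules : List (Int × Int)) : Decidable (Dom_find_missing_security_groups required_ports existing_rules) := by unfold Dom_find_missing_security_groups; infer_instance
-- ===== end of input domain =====

-- B replaces A's per-port scan of all rules by a one-time sort-and-merge of the
-- rules' strict-interior spans, each port then being tested against the merged list
-- (objective: alternative algorithm; A = B on all inputs).

-- ===== PORT A =====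
-- inner 'for start_port, end_port in existing_rules: … break' loop
def fmsg_covered (port : Int) : List (Int × Int) → Bool
  | [] => false
  | (s, e) :: rest => if s < port ∧ port < e then true else fmsg_covered port rest

def find_missing_security_groups (required_ports : List Int) (existing_rules : List (Int × Int)) : List Int :=
  required_ports.foldl (fun not_covered port =>
    if !(fmsg_covered port existing_rules) then not_covered ++ [port] else not_covered) []

-- ===== PORT B =====
-- the 'for s, e in spans' merge loop of Source B, state = (merged, cur)
def fmsg_merge : List (Int × Int) → Option (Int × Int) → List (Int × Int) → List (Int × Int) × Option (Int × Int)
  | merged, cur, [] => (merged, cur)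
  | merged, cur, (s, e) :: rest =>
    match cur with
    | none => fmsg_merge merged (some (s, e)) rest
    | some (cs, ce) =>
      if s ≤ ce + 1 then
        fmsg_merge merged (some (cs, if e > ce then e else ce)) rest
      else
        fmsg_merge (merged ++ [(cs, ce)]) (some (s, e)) rest

def find_missing_security_groups_alt (required_ports : List Int) (existing_rules : List (Int × Int)) : List Int :=
  let spans := PySem.List.sorted
    (existing_rules.filterMap (fun q => if q.1 + 1 ≤ q.2 - 1 then some (q.1 + 1, q.2 - 1) else none))
    (fun t => t.1) false
  let st := fmsg_merge [] none spans
  let merged := st.1 ++ st.2.toList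
  required_ports.filter (fun p => !(merged.any (fun q => decide (q.1 ≤ p) && decide (p ≤ q.2))))

-- ===== PRECONDITION & SPEC =====
def Spec_find_missing_security_groups (required_ports : List Int) (existing_rules : List (Int × Int)) (out : List Int) : Prop := out = find_missing_security_groups_alt required_ports existing_rules
instance (required_ports : List Int) (existing_rules : List (Int × Int)) (out : List Int) : Decidable (Spec_find_missing_security_groups required_ports existing_rules out) := by unfold Spec_find_missing_security_groups; infer_instance

-- ===== CLAIM (what is proved, stated in full; the proofs are below) =====
def Claim_equal_find_missing_security_groups : Prop := ∀ (required_ports : List Int) (existing_rules : List (Int × Int)), Dom_find_missing_security_groups required_ports existing_rules → Spec_find_missing_security_groups required_ports existing_rules (find_missing_security_groups required_ports existing_rules)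

-- ===== LEMMAS AND PROOFS =====

-- p lies (inclusively) in some interval of l
def fmsgInU (p : Int) (l : List (Int × Int)) : Prop := ∃ q ∈ l, q.1 ≤ p ∧ p ≤ q.2

lemma fmsg_covered_iff (p : Int) (rules : List (Int × Int)) :
    fmsg_covered p rules = true ↔ ∃ q ∈ rules, q.1 < p ∧ p < q.2 := by
  induction rules with
  | nil => simp [fmsg_covered]
  | cons q rest ih =>
    obtain ⟨s, e⟩ := q
    by_cases h : s < p ∧ p < e <;> simp [fmsg_covered, h, ih]

lemma fmsgInU_append (p : Int) (a b : List (Int × Int)) :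
    fmsgInU p (a ++ b) ↔ fmsgInU p a ∨ fmsgInU p b := by
  simp [fmsgInU, List.mem_append, or_and_right, exists_or]

lemma fmsgInU_cons (p : Int) (x : Int × Int) (l : List (Int × Int)) :
    fmsgInU p (x :: l) ↔ (x.1 ≤ p ∧ p ≤ x.2) ∨ fmsgInU p l := by
  simp [fmsgInU, List.mem_cons, or_and_right, exists_or, exists_eq_left]

lemma fmsgInU_nil (p : Int) : fmsgInU p ([] : List (Int × Int)) ↔ False := by
  simp [fmsgInU]

-- the merged interval [cs, max ce e] covers exactly the union of [cs, ce] and [s, e]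
lemma fmsg_span_union (cs ce s e p : Int) (hcs : cs ≤ s) (hle : s ≤ ce + 1) :
    (cs ≤ p ∧ p ≤ (if e > ce then e else ce)) ↔ (cs ≤ p ∧ p ≤ ce) ∨ (s ≤ p ∧ p ≤ e) := by
  split_ifs <;> omega

lemma fmsg_merge_mem (rest : List (Int × Int)) :
    ∀ (merged : List (Int × Int)) (cur : Option (Int × Int)),
      (∀ c ∈ cur, ∀ q ∈ rest, c.1 ≤ q.1) →
      rest.Pairwise (fun a b => a.1 ≤ b.1) →
      ∀ p, fmsgInU p ((fmsg_merge merged cur rest).1 ++ (fmsg_merge merged cur rest).2.toList) ↔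
           fmsgInU p (merged ++ cur.toList ++ rest) := by
  induction rest with
  | nil => intro merged cur _ _ p; simp [fmsg_merge]
  | cons hd tl ih =>
    intro merged cur hcur hpw p
    obtain ⟨s, e⟩ := hd
    have hpw' : tl.Pairwise (fun a b => a.1 ≤ b.1) := hpw.sublist (List.sublist_cons_self _ _)
    have hhd : ∀ q ∈ tl, s ≤ q.1 := fun q hq => List.rel_of_pairwise_cons hpw hq
    match cur with
    | none =>
      have hrec := ih merged (some (s, e))
        (by intro c hc q hq; simp at hc; subst hc; exact hhd q hq) hpw' p
      simp only [fmsg_merge] at hrec ⊢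
      rw [hrec]
      simp only [fmsgInU_append, fmsgInU_cons, fmsgInU_nil, Option.toList_some, Option.toList_none]
      tauto
    | some (cs, ce) =>
      have hcs : cs ≤ s := by simpa using hcur (cs, ce) (by simp) (s, e) (by simp)
      by_cases hle : s ≤ ce + 1
      · have hrec := ih merged (some (cs, if e > ce then e else ce))
          (by intro c hc q hq; simp at hc; subst hc; exact le_trans hcs (hhd q hq)) hpw' p
        simp only [fmsg_merge, hle, if_pos] at hrec ⊢
        rw [hrec]
        simp only [fmsgInU_append, fmsgInU_cons, fmsgInU_nil, Option.toList_some]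
        rw [fmsg_span_union cs ce s e p hcs hle]
        tauto
      · have hrec := ih (merged ++ [(cs, ce)]) (some (s, e))
          (by intro c hc q hq; simp at hc; subst hc; exact hhd q hq) hpw' p
        simp only [fmsg_merge, hle, if_neg, not_false_iff] at hrec ⊢
        rw [hrec]
        simp only [fmsgInU_append, fmsgInU_cons, fmsgInU_nil, Option.toList_some]
        tauto

lemma fmsg_alt_pred (p : Int) (existing_rules : List (Int × Int)) :
    (let spans := PySem.List.sorted
        (existing_rules.filterMap (fun q => if q.1 + 1 ≤ q.2 - 1 then some (q.1 + 1, q.2 - 1) else none))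
        (fun t => t.1) false
     let st := fmsg_merge [] none spans
     (st.1 ++ st.2.toList).any (fun q => decide (q.1 ≤ p) && decide (p ≤ q.2)))
    = fmsg_covered p existing_rules := by
  set base := existing_rules.filterMap (fun q => if q.1 + 1 ≤ q.2 - 1 then some (q.1 + 1, q.2 - 1) else none) with hbase
  set spans := PySem.List.sorted base (fun t => t.1) false with hspans
  have hpw : spans.Pairwise (fun a b => a.1 ≤ b.1) := PySem.List.sorted_pairwise base (fun t => t.1)
  have hmem := fmsg_merge_mem spans [] none (by intro c hc; simp at hc) hpw p
  have hany : ((fmsg_merge [] none spans).1 ++ (fmsg_merge [] none spans).2.toList).any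
      (fun q => decide (q.1 ≤ p) && decide (p ≤ q.2)) = true ↔
      fmsgInU p ((fmsg_merge [] none spans).1 ++ (fmsg_merge [] none spans).2.toList) := by
    simp [fmsgInU, List.any_eq_true]
    constructor
    · rintro (⟨a, b, h, h1, h2⟩ | ⟨a, b, h, h1, h2⟩)
      · exact ⟨a, b, Or.inl h, h1, h2⟩
      · exact ⟨a, b, Or.inr h, h1, h2⟩
    · rintro ⟨a, b, h | h, h1, h2⟩
      · exact Or.inl ⟨a, b, h, h1, h2⟩
      · exact Or.inr ⟨a, b, h, h1, h2⟩
  have hspan_iff : fmsgInU p spans ↔ ∃ q ∈ existing_rules, q.1 < p ∧ p < q.2 := by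
    constructor
    · rintro ⟨q, hq, h1, h2⟩
      rw [hspans, PySem.List.mem_sorted, hbase, List.mem_filterMap] at hq
      obtain ⟨r, hr, hfr⟩ := hq
      split at hfr
      · cases hfr; exact ⟨r, hr, by omega, by omega⟩
      · cases hfr
    · rintro ⟨q, hq, h1, h2⟩
      refine ⟨(q.1 + 1, q.2 - 1), ?_, by omega, by omega⟩
      rw [hspans, PySem.List.mem_sorted, hbase, List.mem_filterMap]
      exact ⟨q, hq, by simp; omega⟩
  by_cases hc : fmsg_covered p existing_rules = true
  · rw [hc, hany, hmem]
    simpa [fmsgInU] using hspan_iff.mpr ((fmsg_covered_iff p existing_rules).mp hc)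
  · have hc' : fmsg_covered p existing_rules = false := by
      cases h : fmsg_covered p existing_rules
      · rfl
      · exact absurd h hc
    simp only [hc']
    rw [Bool.eq_false_iff, Ne, hany, hmem]
    intro habs
    have : fmsgInU p spans := by simpa [fmsgInU] using habs
    exact hc ((fmsg_covered_iff p existing_rules).mpr (hspan_iff.mp this))

-- ===== VERDICT (by name: the statement is the Claim_ definition above) =====
theorem find_missing_security_groups_spec : Claim_equal_find_missing_security_groups := by
  intro required_ports existing_rules _
  unfold Spec_find_missing_security_groups find_missing_security_groups find_missing_security_groups_alt
  rw [PySem.List.foldl_append_ite_eq_filter]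
  simp only [List.nil_append]
  apply List.filter_congr
  intro p _
  have := fmsg_alt_pred p existing_rules
  simp only at this
  rw [this]
  simp
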